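-- pv_equiv track=rewrite | github.com/MrGmo/codeWars-Python | 7kyu/initialize-my-name.py | initialize_names
-- ===== SOURCE A (Python) =====
-- def initialize_names(name):
--     result = ''
--     n = name.split()
--     if len(n) <= 2:
--         return name
--     for i in range(0,len(n)):
--         if i == 0:
--             result += n[i]
--         elif i == len(n)-1:
--             result += n[i]
--         else:
--             result += ' '+n[i][0]+'. '
--     return result.replace('  ', ' ')
-- ===== SOURCE B (Python) =====
-- def initialize_names(name):
--     n = name.split()
--     if len(n) <= 2:
--         return name
--     def abbrev(ws):
--         # ws nonempty: abbreviate every word to "<initial>. " except the final one, kept whole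
--         if len(ws) == 1:
--             return ws[0]
--         return ws[0][0] + '. ' + abbrev(ws[1:])
--     return n[0] + ' ' + abbrev(n[1:])
-- ===== Notes on version B (the rewrite author's own statement) =====
-- stated objective: simpler
-- what changed: B replaces A's index loop (with per-index position tests and a trailing global double-space-replace whitespace patch-up) by structural recursion on the token list: a recursive helper consumes the tokens after the first, abbreviating each word until only the final token remains, which it returns whole; no index arithmetic and no post-hoc cleanup.
import Mathlib
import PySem

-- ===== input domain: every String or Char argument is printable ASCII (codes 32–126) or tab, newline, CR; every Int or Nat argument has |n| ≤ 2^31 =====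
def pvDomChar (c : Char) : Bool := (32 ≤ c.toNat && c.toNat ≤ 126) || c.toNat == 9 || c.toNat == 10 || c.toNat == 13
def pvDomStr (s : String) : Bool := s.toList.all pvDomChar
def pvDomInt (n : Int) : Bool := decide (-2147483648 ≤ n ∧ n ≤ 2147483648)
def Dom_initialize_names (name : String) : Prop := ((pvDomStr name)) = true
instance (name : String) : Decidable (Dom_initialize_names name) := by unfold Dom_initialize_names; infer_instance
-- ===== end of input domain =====

-- B abbreviates the middle names by structural recursion on the token list (a helper that keeps the
-- final token whole and abbreviates every earlier one), replacing A's whole-range index loop with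
-- per-index branches and its concatenate-then-global-replace double-space cleanup (objective: simpler).

-- ===== PORT A =====
-- loop body of A's 'for i in range(0, len(n))' (indices are always in range, so pyGetD defaults are never used)
def aBody (n : List String) (result : String) (i : Int) : String :=
  if i = 0 then result ++ PySem.List.pyGetD n i ""
  else if i = (n.length : Int) - 1 then result ++ PySem.List.pyGetD n i ""
  else result ++ " " ++ String.ofList [PySem.List.pyGetD (PySem.List.pyGetD n i "").toList 0 ' '] ++ ". "

def initialize_names (name : String) : String :=
  let n := PySem.Str.split₀ name
  if n.length ≤ 2 then name
  else PySem.Str.replace ((PySem.List.pyRange 0 (n.length : Int) 1).foldl (aBody n) "") "  " " "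

-- ===== PORT B =====
-- Source B's inner 'abbrev': if one word is left return it, else abbreviate the head and recurse
def bAbbrev : List String → String
  | [] => ""            -- unreachable: abbrev is only called on nonempty lists
  | [w] => w
  | w :: rest => String.ofList [PySem.List.pyGetD w.toList 0 ' '] ++ ". " ++ bAbbrev rest

def initialize_names_alt (name : String) : String :=
  let n := PySem.Str.split₀ name
  if n.length ≤ 2 then name
  else PySem.List.pyGetD n 0 "" ++ " " ++ bAbbrev (PySem.List.slice n (some 1) none)

-- ===== PRECONDITION & SPEC =====
def Spec_initialize_names (name : String) (out : String) : Prop := out = initialize_names_alt name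
instance (name : String) (out : String) : Decidable (Spec_initialize_names name out) := by unfold Spec_initialize_names; infer_instance

-- ===== CLAIM (what is proved, stated in full; the proofs are below) =====
def Claim_equal_initialize_names : Prop := ∀ (name : String), Dom_initialize_names name → Spec_initialize_names name (initialize_names name)

-- ===== LEMMAS AND PROOFS =====

-- spec of A's final double-space replace: collapse each non-overlapping double space, scanning left to right
def rep : List Char → List Char
  | [] => []
  | [c] => [c]
  | c :: d :: t => if c = ' ' ∧ d = ' ' then ' ' :: rep t else c :: rep (d :: t)

theorem rep_cons_of_ne (c : Char) (t : List Char) (hc : c ≠ ' ') : rep (c :: t) = c :: rep t := by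
  cases t with
  | nil => rfl
  | cons d t' => simp [rep, hc]

theorem rep_append_nospace (u v : List Char) (h : ∀ c ∈ u, c ≠ ' ') :
    rep (u ++ v) = u ++ rep v := by
  induction u with
  | nil => rfl
  | cons c u' ih =>
    have hc : c ≠ ' ' := h c (by simp)
    simp only [List.cons_append, rep_cons_of_ne c _ hc]
    rw [ih (fun x hx => h x (by simp [hx]))]

theorem rep_self_nospace (u : List Char) (h : ∀ c ∈ u, c ≠ ' ') : rep u = u := by
  have := rep_append_nospace u [] h
  simpa [rep] using this

theorem replace_go_rep : ∀ (fuel : Nat) (l acc : List Char), l.length ≤ fuel →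
    PySem.Chars.replace.go [' ', ' '] [' '] fuel l acc = acc.reverse ++ rep l := by
  intro fuel
  induction fuel with
  | zero =>
    intro l acc h
    have : l = [] := by cases l <;> simp_all
    subst this
    simp [PySem.Chars.replace.go, rep]
  | succ f ih =>
    intro l acc h
    match l with
    | [] => simp [PySem.Chars.replace.go, rep]
    | [c] =>
      have hpre : ([' ', ' '] : List Char).isPrefixOf [c] = false := by
        simp [List.isPrefixOf]
      simp only [PySem.Chars.replace.go, hpre, Bool.false_eq_true, if_false]
      rw [ih [] (c :: acc) (by simp)]
      simp [rep]
    | c :: d :: t =>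
      by_cases hcd : c = ' ' ∧ d = ' '
      · obtain ⟨hc, hd⟩ := hcd
        subst hc; subst hd
        have hpre : ([' ', ' '] : List Char).isPrefixOf (' ' :: ' ' :: t) = true := by
          simp [List.isPrefixOf]
        simp only [PySem.Chars.replace.go, hpre, if_true]
        have hstep : PySem.Chars.replace.go [' ', ' '] [' '] f
            (List.drop ([' ', ' '] : List Char).length (' ' :: ' ' :: t))
            (([' '] : List Char).reverse ++ acc)
            = PySem.Chars.replace.go [' ', ' '] [' '] f t (' ' :: acc) := rfl
        rw [hstep, ih t (' ' :: acc) (by simp at h ⊢; omega)]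
        simp [rep]
      · have hpre : ([' ', ' '] : List Char).isPrefixOf (c :: d :: t) = false := by
          simp [List.isPrefixOf]
          rintro rfl rfl; exact hcd ⟨rfl, rfl⟩
        simp only [PySem.Chars.replace.go, hpre, Bool.false_eq_true, if_false]
        rw [ih (d :: t) (c :: acc) (by simp at h ⊢; omega)]
        simp [rep, hcd]

theorem replace_eq_rep (s : List Char) :
    PySem.Chars.replace s [' ', ' '] [' '] = rep s := by
  simp only [PySem.Chars.replace]
  rw [if_neg (by simp)]
  rw [replace_go_rep s.length s [] le_rfl]
  simp

-- the char pieces contributed per middle word by A before cleanup (' x. '), after cleanup (' x.'),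
-- and by B's recursive helper ('x. ')
def pieceA (w : List Char) : List Char := [' ', w.headD ' ', '.', ' ']
def pieceB (w : List Char) : List Char := [' ', w.headD ' ', '.']
def pieceC (w : List Char) : List Char := [w.headD ' ', '.', ' ']

theorem rep_mid : ∀ (ms : List (List Char)) (w tl : List Char),
    w.headD ' ' ≠ ' ' → (∀ u ∈ ms, u.headD ' ' ≠ ' ') → (∀ c ∈ tl, c ≠ ' ') →
    rep (pieceA w ++ ms.flatMap pieceA ++ tl) = pieceB w ++ ms.flatMap pieceB ++ ' ' :: tl := by
  intro ms
  induction ms with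
  | nil =>
    intro w tl hw _ htl
    simp only [List.flatMap_nil, List.append_nil, pieceA, pieceB]
    simp only [List.cons_append, List.nil_append]
    rw [rep, if_neg (fun hx => hw hx.2)]
    rw [rep_cons_of_ne _ _ hw]
    rw [rep_cons_of_ne _ _ (by decide)]
    cases tl with
    | nil => simp [rep]
    | cons d t =>
      have hd : d ≠ ' ' := htl d (by simp)
      rw [rep, if_neg (fun hx => hd hx.2)]
      rw [rep_self_nospace _ htl]
  | cons w2 ms' ih =>
    intro w tl hw hms htl
    have hw2 : w2.headD ' ' ≠ ' ' := hms w2 (by simp)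
    have hms' : ∀ u ∈ ms', u.headD ' ' ≠ ' ' := fun u hu => hms u (by simp [hu])
    have IH := ih w2 tl hw2 hms' htl
    simp only [List.flatMap_cons, pieceA, pieceB, List.cons_append, List.nil_append] at IH ⊢
    rw [rep, if_neg (fun hx => hw hx.2)]
    rw [rep_cons_of_ne _ _ hw]
    rw [rep_cons_of_ne _ _ (by decide)]
    rw [rep, if_pos ⟨rfl, rfl⟩]
    rw [rep, if_neg (fun hx => hw2 hx.2)] at IH
    injection IH with _ IH2
    rw [IH2]

-- chars appended by A's loop over indices a .. a+k-1 (all middle indices)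
def midChars (n : List String) : Nat → Nat → List Char
  | _, 0 => []
  | a, k+1 => ' ' :: ((n.getD a "").toList.headD ' ') :: '.' :: ' ' :: midChars n (a+1) k

theorem toList_foldl_aBody_mid : ∀ (k a : Nat) (n : List String) (acc : String),
    1 ≤ a → a + k + 1 = n.length →
    ((PySem.List.pyRange (a : Int) ((n.length : Int) - 1) 1).foldl (aBody n) acc).toList
      = acc.toList ++ midChars n a k := by
  intro k
  induction k with
  | zero =>
    intro a n acc _ hlen
    have : ((n.length : Int) - 1) = (a : Int) := by omega
    rw [this]
    simp [PySem.List.pyRange, midChars]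
  | succ k ih =>
    intro a n acc ha hlen
    have hlt : (a : Int) < (n.length : Int) - 1 := by omega
    rw [PySem.List.pyRange_one_cons hlt]
    simp only [List.foldl_cons]
    have hbody : aBody n acc (a : Int)
        = acc ++ " " ++ String.ofList [((n.getD a "").toList.headD ' ')] ++ ". " := by
      unfold aBody
      rw [if_neg (by omega), if_neg (by omega)]
      congr 2
      rw [PySem.List.pyGetD_natCast]
      cases hw : (n.getD a "").toList with
      | nil => decide
      | cons c t => simp [PySem.List.pyGetD]
    have : ((a : Int) + 1) = ((a + 1 : Nat) : Int) := by push_cast; ring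
    rw [hbody, this, ih (a+1) n _ (by omega) (by omega)]
    simp [midChars, String.toList_append]

theorem midChars_eq_flatMap : ∀ (k a : Nat) (n : List String), a + k ≤ n.length →
    midChars n a k = (((n.drop a).take k).map String.toList).flatMap pieceA := by
  intro k
  induction k with
  | zero => intro a n _; simp [midChars]
  | succ k ih =>
    intro a n h
    have ha : a < n.length := by omega
    rw [List.drop_eq_getElem_cons ha]
    simp only [List.take_succ_cons, List.map_cons, List.flatMap_cons]
    rw [midChars, ih (a+1) n (by omega)]
    simp [pieceA, List.getD, List.getElem?_eq_getElem ha]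

theorem pyGetD_zero_headD (l : List Char) : PySem.List.pyGetD l 0 ' ' = l.headD ' ' := by
  cases l with
  | nil => rfl
  | cons c t => simp [PySem.List.pyGetD]

theorem headD_ne_space (w : List Char) (h : w ≠ []) (h2 : ∀ c ∈ w, c ≠ ' ') :
    w.headD ' ' ≠ ' ' := by
  cases w with
  | nil => exact absurd rfl h
  | cons c t => exact h2 c (by simp)

-- tokens produced by str.split(): nonempty, and free of whitespace (in particular of ' ')
theorem split₀_go_facts : ∀ (s cur : List Char) (acc : List (List Char)),
    (∀ w ∈ acc, w ≠ [] ∧ ∀ c ∈ w, PySem.Chars.isspace c = false) →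
    (∀ c ∈ cur, PySem.Chars.isspace c = false) →
    ∀ w ∈ PySem.Chars.split₀.go s cur acc, w ≠ [] ∧ ∀ c ∈ w, PySem.Chars.isspace c = false := by
  intro s
  induction s with
  | nil =>
    intro cur acc hacc hcur w hw
    by_cases hc : cur.isEmpty
    · simp only [PySem.Chars.split₀.go, hc, if_true, List.mem_reverse] at hw
      exact hacc w hw
    · simp only [PySem.Chars.split₀.go, hc, Bool.false_eq_true, if_false, List.mem_reverse,
        List.mem_cons] at hw
      rcases hw with h | h
      · subst h
        refine ⟨by simpa [List.isEmpty_iff] using hc, ?_⟩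
        intro c hcmem
        exact hcur c (by simpa using hcmem)
      · exact hacc w h
  | cons c rest ih =>
    intro cur acc hacc hcur w hw
    by_cases hs : PySem.Chars.isspace c
    · by_cases hc : cur.isEmpty
      · simp only [PySem.Chars.split₀.go, hs, hc, if_true] at hw
        exact ih [] acc hacc (by simp) w hw
      · simp only [PySem.Chars.split₀.go, hs, hc, Bool.false_eq_true, if_false, if_true] at hw
        refine ih [] (cur.reverse :: acc) ?_ (by simp) w hw
        intro u hu
        rcases List.mem_cons.mp hu with h | h
        · subst h
          refine ⟨by simpa [List.isEmpty_iff] using hc, ?_⟩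
          intro x hx
          exact hcur x (by simpa using hx)
        · exact hacc u h
    · simp only [PySem.Chars.split₀.go, hs, Bool.false_eq_true, if_false] at hw
      refine ih (c :: cur) acc hacc ?_ w hw
      intro x hx
      rcases List.mem_cons.mp hx with h | h
      · subst h; simpa using hs
      · exact hcur x h

theorem split₀_facts (cs : List Char) :
    ∀ w ∈ PySem.Chars.split₀ cs, w ≠ [] ∧ ∀ c ∈ w, c ≠ ' ' := by
  intro w hw
  have := split₀_go_facts cs [] [] (by simp) (by simp) w hw
  refine ⟨this.1, ?_⟩
  intro c hc hceq
  have := this.2 c hc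
  rw [hceq] at this
  exact absurd this (by decide)

-- characterization of B's recursive helper on a nonempty token list
theorem bAbbrev_chars : ∀ (ms : List String) (lw : String),
    (bAbbrev (ms ++ [lw])).toList = (ms.map String.toList).flatMap pieceC ++ lw.toList := by
  intro ms
  induction ms with
  | nil => intro lw; simp [bAbbrev]
  | cons w ms' ih =>
    intro lw
    have hstep : bAbbrev (w :: ms' ++ [lw])
        = String.ofList [PySem.List.pyGetD w.toList 0 ' '] ++ ". " ++ bAbbrev (ms' ++ [lw]) := by
      cases ms' <;> rfl
    rw [hstep]
    simp only [String.toList_append, String.toList_ofList, ih]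
    simp [pieceC, pyGetD_zero_headD]

-- shifting the single separating space from the tail side (A's shape) to the head side (B's shape)
theorem shift_space : ∀ (Ms : List (List Char)) (tl : List Char),
    Ms.flatMap pieceB ++ ' ' :: tl = ' ' :: (Ms.flatMap pieceC ++ tl) := by
  intro Ms
  induction Ms with
  | nil => intro tl; simp
  | cons m Ms' ih =>
    intro tl
    simp only [List.flatMap_cons, pieceB, pieceC, List.cons_append, List.nil_append]
    rw [ih]

theorem alt_chars (t0 : String) (ws : List String) (hne : ws ≠ []) :
    (t0 ++ " " ++ bAbbrev ws).toList
      = t0.toList ++ ' ' :: ((ws.dropLast.map String.toList).flatMap pieceC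
          ++ (ws.getLast hne).toList) := by
  conv_lhs => rw [← List.dropLast_append_getLast hne]
  rw [show (t0 ++ " " ++ bAbbrev (ws.dropLast ++ [ws.getLast hne])).toList
      = t0.toList ++ ' ' :: (bAbbrev (ws.dropLast ++ [ws.getLast hne])).toList from by
    simp [String.toList_append]]
  rw [bAbbrev_chars]

theorem alt_toList (n : List String) (h : 3 ≤ n.length) :
    (PySem.List.pyGetD n 0 "" ++ " " ++ bAbbrev (PySem.List.slice n (some 1) none)).toList
    = (n.getD 0 "").toList
        ++ (((n.drop 1).take (n.length - 2)).map String.toList).flatMap pieceB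
        ++ ' ' :: (n.getD (n.length - 1) "").toList := by
  rw [PySem.List.slice_from_one]
  rw [show PySem.List.pyGetD n 0 "" = n.getD 0 "" from PySem.List.pyGetD_natCast n 0 ""]
  have htne : n.tail ≠ [] := by
    intro hx
    have := congrArg List.length hx
    simp at this
    omega
  rw [alt_chars _ _ htne]
  have hmid : n.tail.dropLast = (n.drop 1).take (n.length - 2) := by
    rw [List.dropLast_eq_take, ← List.drop_one]
    congr 1
    simp
    omega
  have hlast : (n.tail.getLast htne) = n.getD (n.length - 1) "" := by
    rw [List.getLast_eq_getElem]
    rw [List.getD_eq_getElem n "" (by omega : n.length - 1 < n.length)]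
    rw [List.getElem_tail]
    congr 1
    simp
    omega
  rw [hmid, hlast, List.append_assoc, shift_space]

theorem string_eq_of_toList {a b : String} (h : a.toList = b.toList) : a = b := by
  rw [← String.ofList_toList (s := a), h, String.ofList_toList]

theorem main_else (n : List String)
    (hfacts : ∀ w ∈ n, w.toList ≠ [] ∧ ∀ c ∈ w.toList, c ≠ ' ')
    (hL : ¬ n.length ≤ 2) :
    PySem.Str.replace ((PySem.List.pyRange 0 (n.length : Int) 1).foldl (aBody n) "") "  " " "
      = PySem.List.pyGetD n 0 "" ++ " " ++ bAbbrev (PySem.List.slice n (some 1) none) := by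
  have hL3 : 3 ≤ n.length := by omega
  apply string_eq_of_toList
  rw [alt_toList n hL3]
  -- range decomposition 0 :: middle ++ [len-1]
  have hcast : ((n.length : Int) - 1) + 1 = (n.length : Int) := by omega
  have hr : PySem.List.pyRange 0 (n.length : Int) 1
      = 0 :: (PySem.List.pyRange 1 ((n.length : Int) - 1) ++ [(n.length : Int) - 1]) := by
    rw [PySem.List.pyRange_one_cons (by omega : (0:Int) < (n.length : Int))]
    rw [show ((0:Int) + 1) = 1 from by omega]
    rw [PySem.List.pyRange_one_append 1 ((n.length : Int) - 1) (n.length : Int) (by omega) (by omega)]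
    rw [PySem.List.pyRange_one_cons (by omega : (n.length : Int) - 1 < (n.length : Int))]
    rw [hcast]
    simp [PySem.List.pyRange]
  rw [hr]
  simp only [List.foldl_cons, List.foldl_append, List.foldl_nil]
  have hacc0 : aBody n "" 0 = "" ++ n.getD 0 "" := by
    unfold aBody
    rw [if_pos rfl, PySem.List.pyGetD_of_nonneg n "" (by omega)]
    rfl
  have hlast : ∀ acc, aBody n acc ((n.length : Int) - 1) = acc ++ n.getD (n.length - 1) "" := by
    intro acc
    unfold aBody
    rw [if_neg (by omega), if_pos rfl, PySem.List.pyGetD_of_nonneg n "" (by omega)]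
    have : ((n.length : Int) - 1).toNat = n.length - 1 := by omega
    rw [this]
  rw [hacc0, hlast]
  rw [show (PySem.Str.replace
      ((List.foldl (aBody n) ("" ++ n.getD 0 "") (PySem.List.pyRange 1 ((n.length:Int) - 1))
        ++ n.getD (n.length - 1) "")) "  " " ").toList
    = PySem.Chars.replace
        ((List.foldl (aBody n) ("" ++ n.getD 0 "") (PySem.List.pyRange 1 ((n.length:Int) - 1))
          ++ n.getD (n.length - 1) "")).toList [' ', ' '] [' ']
    from by simp [PySem.Str.replace]]
  rw [replace_eq_rep]
  rw [String.toList_append]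
  have hmidfold := toList_foldl_aBody_mid (n.length - 2) 1 n ("" ++ n.getD 0 "") (by omega) (by omega)
  rw [show (((1 : Nat)) : Int) = (1 : Int) from by norm_num] at hmidfold
  rw [hmidfold]
  rw [midChars_eq_flatMap (n.length - 2) 1 n (by omega)]
  have ht0 : ("" ++ n.getD 0 "").toList = (n.getD 0 "").toList := by
    simp
  rw [ht0]
  -- facts about the three pieces
  have h0lt : 0 < n.length := by omega
  have hlastlt : n.length - 1 < n.length := by omega
  have ht0mem : n.getD 0 "" ∈ n := by
    rw [List.getD_eq_getElem n "" h0lt]; exact List.getElem_mem h0lt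
  have htlmem : n.getD (n.length - 1) "" ∈ n := by
    rw [List.getD_eq_getElem n "" hlastlt]; exact List.getElem_mem hlastlt
  have ht0f := hfacts _ ht0mem
  have htlf := hfacts _ htlmem
  -- decompose the middle words
  have hmds : ∀ w ∈ (n.drop 1).take (n.length - 2), w ∈ n := by
    intro w hw
    exact List.drop_subset 1 n (List.take_subset _ _ hw)
  cases hM : ((n.drop 1).take (n.length - 2)).map String.toList with
  | nil =>
    exfalso
    have : ((n.drop 1).take (n.length - 2)).length = n.length - 2 := by
      simp [List.length_take]; omega
    have h2 := congrArg List.length hM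
    simp at h2
    omega
  | cons m0 Mr =>
    have hmem : ∀ u ∈ m0 :: Mr, ∃ w ∈ n, u = w.toList := by
      intro u hu
      rw [← hM] at hu
      obtain ⟨w, hw, rfl⟩ := List.mem_map.mp hu
      exact ⟨w, hmds w hw, rfl⟩
    have hheads : ∀ u ∈ m0 :: Mr, u.headD ' ' ≠ ' ' := by
      intro u hu
      obtain ⟨w, hw, rfl⟩ := hmem u hu
      exact headD_ne_space _ (hfacts w hw).1 (hfacts w hw).2
    simp only [List.flatMap_cons, ← List.append_assoc]
    rw [List.append_assoc (n.getD 0 "").toList, List.append_assoc (n.getD 0 "").toList]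
    rw [rep_append_nospace _ _ ht0f.2]
    rw [rep_mid Mr m0 _ (hheads m0 (by simp)) (fun u hu => hheads u (by simp [hu])) htlf.2]
    simp [List.append_assoc]

-- ===== VERDICT (by name: the statement is the Claim_ definition above) =====
theorem initialize_names_spec : Claim_equal_initialize_names := by
  intro name _
  unfold Spec_initialize_names initialize_names initialize_names_alt
  by_cases hL : (PySem.Str.split₀ name).length ≤ 2
  · simp only [hL, if_pos]
  · rw [if_neg hL, if_neg hL]
    apply main_else
    · intro w hw
      simp only [PySem.Str.split₀] at hw
      obtain ⟨t, ht, rfl⟩ := List.mem_map.mp hw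
      rw [String.toList_ofList]
      exact ⟨(split₀_facts _ t ht).1, (split₀_facts _ t ht).2⟩
    · exact hL
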